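-- pv_equiv track=rewrite | github.com/LucasZick/ShortProjectsAndPracticing_Python | Python/nothingUseful/ShortQuestions/has22.py | has22
-- ===== SOURCE A (Python) =====
-- def has22(nums):
--     string = ''
--     for num in nums:
--         string = string + str(num)
--     if '22' in string:
--         return True
--     else:
--         return False
-- ===== SOURCE B (Python) =====
-- def has22(nums):
--     prev = False
--     for num in nums:
--         for ch in str(num):
--             if ch == '2':
--                 if prev:
--                     return True
--                 prev = True
--             else:
--                 prev = False
--     return False
-- ===== Notes on version B (the rewrite author's own statement) =====
-- stated objective: faster
-- what changed: B replaces A's build-the-whole-concatenated-string-then-substring-search with a single character-by-character scan that keeps a one-bit 'previous char was 2' state and returns early on the first match, never materialising the concatenation.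
import Mathlib
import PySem

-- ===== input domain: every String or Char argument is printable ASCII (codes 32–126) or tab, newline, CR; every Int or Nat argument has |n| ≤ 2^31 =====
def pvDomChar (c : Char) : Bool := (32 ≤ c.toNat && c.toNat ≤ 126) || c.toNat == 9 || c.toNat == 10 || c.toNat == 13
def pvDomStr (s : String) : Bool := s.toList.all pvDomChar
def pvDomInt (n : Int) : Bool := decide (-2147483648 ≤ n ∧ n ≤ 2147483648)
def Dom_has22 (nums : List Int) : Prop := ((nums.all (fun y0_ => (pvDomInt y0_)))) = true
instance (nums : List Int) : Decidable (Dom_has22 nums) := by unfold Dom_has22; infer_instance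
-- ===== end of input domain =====

-- B replaces A's build-the-whole-string-then-'22' in it with a one-pass scan holding a
-- one-bit "previous char was '2'" state and an early return (measured faster: it avoids
-- A's repeated string concatenation); same value on every input.
-- Python strings are represented as List Char throughout (PySem.Chars is exact there).

-- ===== PORT A =====
-- string = ''; for num in nums: string = string + str(num); return '22' in string
def has22 (nums : List Int) : Bool :=
  let string := nums.foldl (fun acc num => acc ++ PySem.Int.toChars num) ([] : List Char)
  if PySem.Chars.isIn ['2', '2'] string then true else false

-- ===== PORT B =====
-- inner loop: for ch in str(num): … ; returns (returned-True?, prev flag after the chars)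
def has22Scan (prev : Bool) : List Char → Bool × Bool
  | [] => (false, prev)
  | c :: cs =>
      if c = '2' then
        if prev then (true, true) else has22Scan true cs
      else has22Scan false cs

-- outer loop over nums carrying the prev flag
def has22Go (prev : Bool) : List Int → Bool
  | [] => false
  | n :: ns =>
      match has22Scan prev (PySem.Int.toChars n) with
      | (true, _) => true
      | (false, p) => has22Go p ns

def has22_alt (nums : List Int) : Bool := has22Go false nums

-- ===== PRECONDITION & SPEC =====
def Spec_has22 (nums : List Int) (out : Bool) : Prop := out = has22_alt nums
instance (nums : List Int) (out : Bool) : Decidable (Spec_has22 nums out) := by unfold Spec_has22; infer_instance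

-- ===== CLAIM (what is proved, stated in full; the proofs are below) =====
def Claim_equal_has22 : Prop := ∀ (nums : List Int), Dom_has22 nums → Spec_has22 nums (has22 nums)

-- ===== LEMMAS AND PROOFS =====

-- proof-only: the scanner's value as a pure function of the char stream
def scanAll (prev : Bool) : List Char → Bool
  | [] => false
  | c :: cs => if c = '2' then (prev || scanAll true cs) else scanAll false cs

-- proof-only: the flag carried out of a block of chars
def afterFlag (prev : Bool) (s : List Char) : Bool :=
  match s.getLast? with
  | none => prev
  | some c => decide (c = '2')

theorem scanAll_cons_two (prev : Bool) (cs : List Char) :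
    scanAll prev ('2' :: cs) = (prev || scanAll true cs) := by simp [scanAll]

theorem scanAll_cons_ne (prev : Bool) {c : Char} (cs : List Char) (hc : c ≠ '2') :
    scanAll prev (c :: cs) = scanAll false cs := by simp [scanAll, hc]

theorem has22Scan_cons_two_false (cs : List Char) :
    has22Scan false ('2' :: cs) = has22Scan true cs := by simp [has22Scan]

theorem has22Scan_cons_two_true (cs : List Char) :
    has22Scan true ('2' :: cs) = (true, true) := by simp [has22Scan]

theorem has22Scan_cons_ne (prev : Bool) {c : Char} (cs : List Char) (hc : c ≠ '2') :
    has22Scan prev (c :: cs) = has22Scan false cs := by simp [has22Scan, hc]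

theorem afterFlag_cons (prev : Bool) (c : Char) (cs : List Char) :
    afterFlag prev (c :: cs) = afterFlag (decide (c = '2')) cs := by
  cases cs with
  | nil => simp [afterFlag]
  | cons d ds =>
      cases hg : (d :: ds).getLast? with
      | none => simp at hg
      | some e => simp [afterFlag, List.getLast?_cons_cons, hg]

-- B's scanner computes scanAll, and (when it has not returned) the flag afterFlag
theorem has22Scan_eq (s : List Char) (prev : Bool) :
    (has22Scan prev s).1 = scanAll prev s ∧
    (scanAll prev s = false → (has22Scan prev s).2 = afterFlag prev s) := by
  induction s generalizing prev with
  | nil => simp [has22Scan, scanAll, afterFlag]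
  | cons c cs ih =>
      by_cases hc : c = '2'
      · subst hc
        cases prev with
        | false =>
            have := ih true
            rw [has22Scan_cons_two_false, scanAll_cons_two, afterFlag_cons]
            simpa using this
        | true =>
            rw [has22Scan_cons_two_true, scanAll_cons_two]
            simp
      · rw [has22Scan_cons_ne _ _ hc, scanAll_cons_ne _ _ hc, afterFlag_cons]
        simpa [hc] using ih false

-- the pure scanner splits over append through the carried flag
theorem scanAll_append (a b : List Char) (prev : Bool) :
    scanAll prev (a ++ b) = (scanAll prev a || scanAll (afterFlag prev a) b) := by
  induction a generalizing prev with
  | nil => simp [scanAll, afterFlag]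
  | cons c cs ih =>
      by_cases hc : c = '2'
      · subst hc
        rw [List.cons_append, scanAll_cons_two, scanAll_cons_two, ih, afterFlag_cons]
        simp [Bool.or_assoc]
      · rw [List.cons_append, scanAll_cons_ne _ _ hc, scanAll_cons_ne _ _ hc, ih,
            afterFlag_cons]
        simp [hc]

-- B's outer loop is the pure scanner over the flattened character stream
theorem has22Go_eq (ns : List Int) (prev : Bool) :
    has22Go prev ns = scanAll prev (ns.flatMap PySem.Int.toChars) := by
  induction ns generalizing prev with
  | nil => simp [has22Go, scanAll]
  | cons n ns ih =>
      have hs := has22Scan_eq (PySem.Int.toChars n) prev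
      simp only [List.flatMap_cons]
      rw [scanAll_append]
      cases hsc : scanAll prev (PySem.Int.toChars n) with
      | true =>
          have h1 : (has22Scan prev (PySem.Int.toChars n)).1 = true := by rw [hs.1, hsc]
          simp only [has22Go]
          rcases h : has22Scan prev (PySem.Int.toChars n) with ⟨f, p⟩
          rw [h] at h1; simp at h1; subst h1
          simp
      | false =>
          have h1 : (has22Scan prev (PySem.Int.toChars n)).1 = false := by rw [hs.1, hsc]
          have h2 := hs.2 hsc
          simp only [has22Go]
          rcases h : has22Scan prev (PySem.Int.toChars n) with ⟨f, p⟩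
          rw [h] at h1 h2; simp at h1 h2; subst h1; subst h2
          simp [ih]

-- ['2'] is a prefix iff the head is '2'
theorem prefix_two_iff (cs : List Char) : ['2'] <+: cs ↔ cs.head? = some '2' := by
  cases cs with
  | nil => simp
  | cons d ds =>
      simp only [List.head?_cons, Option.some.injEq]
      constructor
      · rintro ⟨t, ht⟩
        injection ht with hd _
        exact hd.symm
      · intro h
        subst h
        exact ⟨ds, rfl⟩

-- the pure scanner finds a match iff "22" occurs, or the flag is set and the head is '2'
theorem scanAll_iff (s : List Char) (prev : Bool) :
    scanAll prev s = true ↔ (['2','2'] <:+: s ∨ (prev = true ∧ s.head? = some '2')) := by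
  induction s generalizing prev with
  | nil => simp [scanAll]
  | cons c cs ih =>
      by_cases hc : c = '2'
      · subst hc
        rw [scanAll_cons_two]
        simp only [Bool.or_eq_true, ih]
        constructor
        · rintro (hp | h | ⟨-, hh⟩)
          · exact Or.inr ⟨hp, rfl⟩
          · exact Or.inl (h.trans (List.suffix_cons _ _).isInfix)
          · refine Or.inl ?_
            rcases (prefix_two_iff cs).mpr hh with ⟨t, ht⟩
            exact ⟨[], t, by simp [← ht]⟩
        · rintro (h | ⟨hp, -⟩)
          · rcases List.infix_cons_iff.mp h with h | h
            · rcases h with ⟨t, ht⟩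
              injection ht with _ ht2
              exact Or.inr (Or.inr ⟨by trivial, (prefix_two_iff cs).mp ⟨t, ht2⟩⟩)
            · exact Or.inr (Or.inl h)
          · exact Or.inl hp
      · rw [scanAll_cons_ne _ _ hc]
        rw [ih]
        constructor
        · rintro (h | ⟨h, -⟩)
          · exact Or.inl (h.trans (List.suffix_cons _ _).isInfix)
          · simp at h
        · rintro (h | ⟨-, hh⟩)
          · rcases List.infix_cons_iff.mp h with h | h
            · exfalso
              rcases h with ⟨t, ht⟩
              injection ht with hd _
              exact hc hd.symm
            · exact Or.inl h
          · exfalso; simp at hh; exact hc hh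

-- ===== VERDICT (by name: the statement is the Claim_ definition above) =====
theorem has22_spec : Claim_equal_has22 := by
  intro nums _
  unfold Spec_has22 has22 has22_alt
  rw [PySem.List.foldl_append_eq_flatMap]
  rw [has22Go_eq]
  simp only [List.nil_append]
  by_cases h : PySem.Chars.isIn ['2','2'] (nums.flatMap PySem.Int.toChars) = true
  · have := (PySem.Chars.isIn_iff_infix _ _).mp h
    simp [h, ((scanAll_iff _ _).mpr (Or.inl this))]
  · have h' : PySem.Chars.isIn ['2','2'] (nums.flatMap PySem.Int.toChars) = false := by
      cases hx : PySem.Chars.isIn ['2','2'] (nums.flatMap PySem.Int.toChars) <;> simp_all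
    have hni := (PySem.Chars.isIn_eq_false_iff _ _).mp h'
    rw [if_neg h]
    cases hs : scanAll false (nums.flatMap PySem.Int.toChars) with
    | false => rfl
    | true =>
        rcases (scanAll_iff _ _).mp hs with h2 | ⟨h2, -⟩
        · exact absurd h2 hni
        · simp at h2
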